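-- pv_equiv track=rewrite | github.com/k2works/pragmatic-programing-exercise-2023 | src/api/chap01_test.py | sum_verbose_1
-- ===== SOURCE A (Python) =====
-- def sum_verbose_1(a, b):
--     """ aからbまでの総和を求める
--     >>> sum_verbose_1(3,4)
--     '3 + 4 = 7'
--     """
--
--     if a > b:
--         a, b = b, a
--
--     sum = 0
--     result = ''
--     for i in range(a, b + 1):
--         if i < b:
--             result += f'{i} + '
--         else:
--             result += f'{i} ='
--         sum += i
--     result += f' {sum}'
--     return result
-- ===== SOURCE B (Python) =====
-- def sum_verbose_1(a, b):
--     """aからbまでの総和を求める: listing via join, total via closed form."""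
--     if a > b:
--         a, b = b, a
--     total = (a + b) * (b - a + 1) // 2
--     return ' + '.join(str(i) for i in range(a, b + 1)) + ' = ' + str(total)
-- ===== Notes on version B (the rewrite author's own statement) =====
-- stated objective: simpler
-- what changed: Replaces the fused accumulator loop (per-iteration i<b branch, running sum, string +=) by a ' + '.join over the stringified range plus the closed-form Gauss sum (a+b)*(b-a+1)//2.
import Mathlib
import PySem

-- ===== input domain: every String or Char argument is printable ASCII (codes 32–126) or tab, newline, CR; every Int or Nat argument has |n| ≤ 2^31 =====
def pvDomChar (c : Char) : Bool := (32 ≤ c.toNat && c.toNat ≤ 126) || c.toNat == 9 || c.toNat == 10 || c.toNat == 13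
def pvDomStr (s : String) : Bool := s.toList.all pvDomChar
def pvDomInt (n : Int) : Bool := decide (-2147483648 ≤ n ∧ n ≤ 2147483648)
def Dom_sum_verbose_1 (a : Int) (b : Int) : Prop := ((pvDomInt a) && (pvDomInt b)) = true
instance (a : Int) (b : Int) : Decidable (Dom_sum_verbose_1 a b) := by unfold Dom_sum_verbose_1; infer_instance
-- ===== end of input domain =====

-- B replaces A's fused accumulator loop (running sum + per-iteration i<b branch) by a
-- ' + '.join over the stringified range plus the closed-form Gauss sum; objective: simpler.

-- ===== PORT A =====
def sum_verbose_1 (a : Int) (b : Int) : String :=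
  let p := if a > b then (b, a) else (a, b)
  let st := (PySem.List.pyRange p.1 (p.2 + 1) 1).foldl
    (fun (st : Int × String) i =>
      (st.1 + i, st.2 ++ (if i < p.2 then PySem.Int.toStr i ++ " + " else PySem.Int.toStr i ++ " =")))
    (0, "")
  st.2 ++ (" " ++ PySem.Int.toStr st.1)

-- ===== PORT B =====
def sum_verbose_1_alt (a : Int) (b : Int) : String :=
  let p := if a > b then (b, a) else (a, b)
  let total := PySem.Int.floordiv ((p.1 + p.2) * (p.2 - p.1 + 1)) 2
  PySem.Str.join " + " ((PySem.List.pyRange p.1 (p.2 + 1) 1).map PySem.Int.toStr)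
    ++ (" = " ++ PySem.Int.toStr total)

-- ===== PRECONDITION & SPEC =====
def Spec_sum_verbose_1 (a : Int) (b : Int) (out : String) : Prop := out = sum_verbose_1_alt a b
instance (a : Int) (b : Int) (out : String) : Decidable (Spec_sum_verbose_1 a b out) := by unfold Spec_sum_verbose_1; infer_instance

-- ===== CLAIM (what is proved, stated in full; the proofs are below) =====
def Claim_equal_sum_verbose_1 : Prop := ∀ (a : Int) (b : Int), Dom_sum_verbose_1 a b → Spec_sum_verbose_1 a b (sum_verbose_1 a b)

-- ===== LEMMAS AND PROOFS =====

-- Characterisation of A's loop on the range lo..hi (for lo ≤ hi, i.e. hi = lo + n):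
-- it adds the range sum to the accumulator and appends the joined listing followed by " =".
theorem pv_loop (hi : Int) : ∀ (n : Nat) (lo : Int), lo + n = hi → ∀ (s : Int) (r : String),
    (PySem.List.pyRange lo (hi + 1) 1).foldl
      (fun (st : Int × String) i =>
        (st.1 + i, st.2 ++ (if i < hi then PySem.Int.toStr i ++ " + " else PySem.Int.toStr i ++ " =")))
      (s, r)
    = (s + (PySem.List.pyRange lo (hi + 1) 1).sum,
       r ++ (PySem.Str.join " + " ((PySem.List.pyRange lo (hi + 1) 1).map PySem.Int.toStr) ++ " =")) := by
  intro n
  induction n with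
  | zero =>
      intro lo h s r
      have hlo : lo = hi := by omega
      subst hlo
      rw [PySem.List.pyRange_one_singleton]
      simp only [List.foldl_cons, List.foldl_nil, List.sum_cons, List.sum_nil, List.map_cons,
        List.map_nil, lt_self_iff_false, if_false]
      refine Prod.ext (by simp) ?_
      apply String.toList_inj.mp
      simp [PySem.Str.toList_join, PySem.Chars.join_singleton]
  | succ n ih =>
      intro lo h s r
      have hlt : lo < hi := by omega
      rw [PySem.List.pyRange_one_cons (by omega : lo < hi + 1)]
      simp only [List.foldl_cons, if_pos hlt, List.sum_cons, List.map_cons]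
      rw [ih (lo + 1) (by omega)]
      refine Prod.ext (by simp; ring) ?_
      -- the tail range is nonempty (lo+1 ≤ hi), so the join splits off "toStr lo ++ ' + '"
      rw [PySem.List.pyRange_one_cons (by omega : lo + 1 < hi + 1)]
      apply String.toList_inj.mp
      simp [PySem.Str.toList_join, PySem.Chars.join_cons_cons]

-- Gauss: twice the sum of the range lo..hi is (lo+hi)*(hi-lo+1).
theorem pv_gauss (lo : Int) : ∀ (n : Nat) (hi : Int), lo + n = hi →
    2 * (PySem.List.pyRange lo (hi + 1) 1).sum = (lo + hi) * (hi - lo + 1) := by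
  intro n
  induction n with
  | zero =>
      intro hi h
      have : hi = lo := by omega
      subst this
      rw [PySem.List.pyRange_one_singleton]
      simp; ring
  | succ n ih =>
      intro hi h
      rw [PySem.List.pyRange_one_succ_right (by omega : lo ≤ hi)]
      simp only [List.sum_append, List.sum_cons, List.sum_nil]
      have hrec := ih (hi - 1) (by omega)
      rw [show hi - 1 + 1 = hi by ring] at hrec
      linear_combination hrec

theorem pv_total (lo hi : Int) (h : lo ≤ hi) :
    PySem.Int.floordiv ((lo + hi) * (hi - lo + 1)) 2 = (PySem.List.pyRange lo (hi + 1) 1).sum := by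
  rw [← pv_gauss lo (hi - lo).toNat hi (by omega)]
  rw [PySem.Int.floordiv_eq_ediv_of_pos (by norm_num)]
  exact Int.mul_ediv_cancel_left _ (by norm_num)

-- A = B on a sorted pair lo ≤ hi.
theorem pv_core (lo hi : Int) (h : lo ≤ hi) :
    ((PySem.List.pyRange lo (hi + 1) 1).foldl
      (fun (st : Int × String) i =>
        (st.1 + i, st.2 ++ (if i < hi then PySem.Int.toStr i ++ " + " else PySem.Int.toStr i ++ " =")))
      (0, "")).2
      ++ (" " ++ PySem.Int.toStr ((PySem.List.pyRange lo (hi + 1) 1).foldl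
      (fun (st : Int × String) i =>
        (st.1 + i, st.2 ++ (if i < hi then PySem.Int.toStr i ++ " + " else PySem.Int.toStr i ++ " =")))
      (0, "")).1)
    = PySem.Str.join " + " ((PySem.List.pyRange lo (hi + 1) 1).map PySem.Int.toStr)
      ++ (" = " ++ PySem.Int.toStr (PySem.Int.floordiv ((lo + hi) * (hi - lo + 1)) 2)) := by
  rw [pv_loop hi (hi - lo).toNat lo (by omega), pv_total lo hi h]
  apply String.toList_inj.mp
  simp

-- ===== VERDICT (by name: the statement is the Claim_ definition above) =====
theorem sum_verbose_1_spec : Claim_equal_sum_verbose_1 := by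
  intro a b _
  unfold Spec_sum_verbose_1 sum_verbose_1 sum_verbose_1_alt
  by_cases hab : a > b
  · simp only [if_pos hab]
    exact pv_core b a (by omega)
  · simp only [if_neg hab]
    exact pv_core a b (by omega)
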